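-- pv_equiv track=rewrite | github.com/sleeepeer/PISanitizer | src/group_peaks.py | group_consecutive_peaks
-- ===== SOURCE A (Python) =====
-- def group_consecutive_peaks(peaks, max_gap=20):
--     if len(peaks) == 0:
--         return []
--     groups = []
--     current_group = [peaks[0]]
--     for i in range(1, len(peaks)):
--         if peaks[i] - peaks[i - 1] <= max_gap:
--             current_group.append(peaks[i])
--         else:
--             groups.append(current_group)
--             current_group = [peaks[i]]
--     groups.append(current_group)
--     return groups
-- ===== SOURCE B (Python) =====
-- def group_consecutive_peaks(peaks, max_gap=20):
--     if len(peaks) == 0: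
--         return []
--     boundaries = [i for i in range(1, len(peaks)) if peaks[i] - peaks[i - 1] > max_gap]
--     cuts = [0] + boundaries + [len(peaks)]
--     return [peaks[s:e] for s, e in zip(cuts, cuts[1:])]
-- ===== Notes on version B (the rewrite author's own statement) =====
-- stated objective: alternative
-- what changed: Replaces the single accumulate-and-emit loop (growing a current group and flushing it at each large gap) by two passes: one comprehension collecting the break indices, then slicing the input between consecutive cut points.
import Mathlib
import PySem

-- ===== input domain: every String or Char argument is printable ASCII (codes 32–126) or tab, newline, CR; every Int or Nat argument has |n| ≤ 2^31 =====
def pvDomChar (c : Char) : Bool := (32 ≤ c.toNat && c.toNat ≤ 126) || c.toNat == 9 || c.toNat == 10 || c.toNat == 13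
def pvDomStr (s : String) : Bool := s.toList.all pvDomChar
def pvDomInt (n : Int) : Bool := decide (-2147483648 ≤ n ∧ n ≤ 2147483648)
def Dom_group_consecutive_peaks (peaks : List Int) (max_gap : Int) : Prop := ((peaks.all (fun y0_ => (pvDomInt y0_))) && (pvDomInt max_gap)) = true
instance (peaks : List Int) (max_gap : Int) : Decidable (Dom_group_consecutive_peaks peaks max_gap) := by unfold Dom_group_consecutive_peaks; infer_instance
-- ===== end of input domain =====

-- B replaces A's accumulate-and-flush loop by a boundary-finding pass plus a slicing pass (alternative decomposition, same cost).


-- ===== PORT A =====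
def group_consecutive_peaks (peaks : List Int) (max_gap : Int) : List (List Int) :=
  if peaks.length = 0 then []
  else
    let st := (PySem.List.pyRange 1 (peaks.length : Int) 1).foldl
      (fun (st : List (List Int) × List Int) i =>
        if PySem.List.pyGetD peaks i 0 - PySem.List.pyGetD peaks (i - 1) 0 ≤ max_gap then
          (st.1, st.2 ++ [PySem.List.pyGetD peaks i 0])
        else
          (st.1 ++ [st.2], [PySem.List.pyGetD peaks i 0]))
      ([], [PySem.List.pyGetD peaks 0 0])
    st.1 ++ [st.2]

-- ===== PORT B =====
def group_consecutive_peaks_alt (peaks : List Int) (max_gap : Int) : List (List Int) :=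
  if peaks.length = 0 then []
  else
    let boundaries := (PySem.List.pyRange 1 (peaks.length : Int) 1).filter
      (fun i => PySem.List.pyGetD peaks i 0 - PySem.List.pyGetD peaks (i - 1) 0 > max_gap)
    let cuts := 0 :: (boundaries ++ [(peaks.length : Int)])
    (cuts.zip cuts.tail).map (fun se => PySem.List.slice peaks (some se.1) (some se.2))

-- ===== PRECONDITION & SPEC =====
def Spec_group_consecutive_peaks (peaks : List Int) (max_gap : Int) (out : List (List Int)) : Prop := out = group_consecutive_peaks_alt peaks max_gap
instance (peaks : List Int) (max_gap : Int) (out : List (List Int)) : Decidable (Spec_group_consecutive_peaks peaks max_gap out) := by unfold Spec_group_consecutive_peaks; infer_instance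

-- ===== CLAIM (what is proved, stated in full; the proofs are below) =====
def Claim_equal_group_consecutive_peaks : Prop := ∀ (peaks : List Int) (max_gap : Int), Dom_group_consecutive_peaks peaks max_gap → Spec_group_consecutive_peaks peaks max_gap (group_consecutive_peaks peaks max_gap)

-- ===== LEMMAS AND PROOFS =====

-- the break indices among 1..k-1 (B's `boundaries` restricted to a prefix)
def pvBs (peaks : List Int) (max_gap : Int) (k : Int) : List Int :=
  (PySem.List.pyRange 1 k 1).filter
    (fun i => PySem.List.pyGetD peaks i 0 - PySem.List.pyGetD peaks (i - 1) 0 > max_gap)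

-- extending a slice by the next element
theorem pv_slice_snoc (xs : List Int) (c m : ℕ) (hcm : c ≤ m) (hm : m < xs.length) :
    PySem.List.slice xs (some (c : Int)) (some (m : Int)) ++ [PySem.List.pyGetD xs (m : Int) 0]
      = PySem.List.slice xs (some (c : Int)) (some ((m : Int) + 1)) := by
  have h1 : ((m : Int) + 1) = ((m + 1 : ℕ) : Int) := by push_cast; ring
  rw [h1, PySem.List.slice_natCast, PySem.List.slice_natCast, PySem.List.pyGetD_natCast]
  have hlen : m - c < (xs.drop c).length := by
    simp [List.length_drop]; omega
  rw [show m + 1 - c = (m - c) + 1 by omega, List.take_add_one]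
  have : (xs.drop c)[m - c]? = some ((xs.drop c)[m - c]) := List.getElem?_eq_getElem hlen
  rw [this]
  simp [List.getElem_drop, List.getD_eq_getElem?_getD, List.getElem?_eq_getElem hm,
    show c + (m - c) = m by omega]

-- a one-element slice
theorem pv_slice_one (xs : List Int) (m : ℕ) (hm : m < xs.length) :
    PySem.List.slice xs (some (m : Int)) (some ((m : Int) + 1)) = [PySem.List.pyGetD xs (m : Int) 0] := by
  have h1 : ((m : Int) + 1) = ((m + 1 : ℕ) : Int) := by push_cast; ring
  rw [h1, PySem.List.slice_natCast, PySem.List.pyGetD_natCast]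
  rw [show m + 1 - m = 1 by omega]
  have hd : xs.drop m = xs[m] :: xs.drop (m + 1) := List.drop_eq_getElem_cons hm
  rw [hd]
  show [xs[m]] = [xs.getD m 0]
  rw [List.getD_eq_getElem?_getD, List.getElem?_eq_getElem hm]
  rfl

-- appending a cut adds one consecutive pair
theorem pv_zip_concat (bs : List Int) (a n : Int) :
    (a :: (bs ++ [n])).zip (bs ++ [n]) = ((a :: bs).zip bs) ++ [(List.getLastD bs a, n)] := by
  induction bs generalizing a with
  | nil => simp
  | cons x xs ih =>
      rw [show List.getLastD (x :: xs) a = List.getLastD xs x from List.getLastD_cons ..]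
      simp [List.zip_cons_cons] at *
      exact ih x

theorem pv_getLastD_cases (l : List Int) (d : Int) : l.getLastD d = d ∨ l.getLastD d ∈ l := by
  have h := @List.getLastD_mem_cons _ l d
  rw [List.mem_cons] at h
  exact h.imp (fun h => h) (fun h => h)

theorem pv_getLastD_snoc (l : List Int) (a : Int) : ∀ d : Int, List.getLastD (l ++ [a]) d = a := by
  induction l with
  | nil => intro d; rfl
  | cons x xs ih => intro d; rw [List.cons_append, List.getLastD_cons]; exact ih x

-- the last cut so far is a legal nonnegative index below k
theorem pv_lastCut_bounds (peaks : List Int) (max_gap : Int) (k : ℕ) (h1 : 1 ≤ k) :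
    0 ≤ List.getLastD (pvBs peaks max_gap (k : Int)) 0 ∧
      List.getLastD (pvBs peaks max_gap (k : Int)) 0 < (k : Int) := by
  rcases pv_getLastD_cases (pvBs peaks max_gap (k : Int)) 0 with h | h
  · rw [h]; constructor <;> [exact le_refl 0; exact_mod_cast h1]
  · have hm := List.mem_filter.mp h
    have := (PySem.List.mem_pyRange_one).mp hm.1
    omega

-- the loop invariant: after scanning indices 1..k-1, A's state is B's slices so far plus the open slice
theorem pv_invariant (peaks : List Int) (max_gap : Int) (k : ℕ) (h1 : 1 ≤ k) (h2 : k ≤ peaks.length) :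
    (PySem.List.pyRange 1 (k : Int) 1).foldl
      (fun (st : List (List Int) × List Int) i =>
        if PySem.List.pyGetD peaks i 0 - PySem.List.pyGetD peaks (i - 1) 0 ≤ max_gap then
          (st.1, st.2 ++ [PySem.List.pyGetD peaks i 0])
        else
          (st.1 ++ [st.2], [PySem.List.pyGetD peaks i 0]))
      ([], [PySem.List.pyGetD peaks 0 0])
    = ((((0 : Int) :: pvBs peaks max_gap (k : Int)).zip (pvBs peaks max_gap (k : Int))).map
          (fun se => PySem.List.slice peaks (some se.1) (some se.2)),
        PySem.List.slice peaks (some (List.getLastD (pvBs peaks max_gap (k : Int)) 0)) (some (k : Int))) := by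
  induction k with
  | zero => omega
  | succ k ih =>
    by_cases hk1 : k = 0
    · subst hk1
      have hr : PySem.List.pyRange 1 ((1 : ℕ) : Int) 1 = [] := by
        apply PySem.List.pyRange_one_eq_nil; norm_num
      rw [show ((0 + 1 : ℕ) : Int) = ((1 : ℕ) : Int) by norm_num] at *
      rw [hr]
      unfold pvBs
      rw [hr]
      simp only [List.filter_nil, List.foldl_nil, List.zip_nil_right, List.map_nil,
        List.getLastD_nil]
      have hone := pv_slice_one peaks 0 (by omega)
      norm_num at hone ⊢
      rw [hone]
    · have hk : 1 ≤ k := by omega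
      have hr : PySem.List.pyRange 1 ((k + 1 : ℕ) : Int) 1
          = PySem.List.pyRange 1 (k : Int) 1 ++ [(k : Int)] := by
        rw [show ((k + 1 : ℕ) : Int) = (k : Int) + 1 by push_cast; ring]
        exact PySem.List.pyRange_one_succ_right (by exact_mod_cast hk)
      have hbs :
          pvBs peaks max_gap ((k + 1 : ℕ) : Int) = pvBs peaks max_gap (k : Int) ++
            (if PySem.List.pyGetD peaks (k : Int) 0 - PySem.List.pyGetD peaks ((k : Int) - 1) 0 ≤ max_gap
              then [] else [(k : Int)]) := by
        unfold pvBs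
        rw [hr, List.filter_append]
        congr 1
        split_ifs with hc
        · have hx : PySem.List.pyGetD peaks ((k : ℕ) : Int) 0 = peaks[k]?.getD 0 := by
            simp [List.getD_eq_getElem?_getD]
          rw [hx] at hc
          simp
          omega
        · have hx : PySem.List.pyGetD peaks ((k : ℕ) : Int) 0 = peaks[k]?.getD 0 := by
            simp [List.getD_eq_getElem?_getD]
          rw [hx] at hc
          simp
          omega
      have hlast := pv_lastCut_bounds peaks max_gap k hk
      rw [hr, List.foldl_append, ih hk (by omega)]
      simp only [List.foldl_cons, List.foldl_nil]
      by_cases hc : PySem.List.pyGetD peaks (k : Int) 0 - PySem.List.pyGetD peaks ((k : Int) - 1) 0 ≤ max_gap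
      · rw [if_pos hc, hbs, if_pos hc, List.append_nil]
        refine Prod.ext rfl ?_
        simp only
        set c : Int := List.getLastD (pvBs peaks max_gap (k : Int)) 0 with hcdef
        have hc0 : 0 ≤ c := hlast.1
        have hck : c < (k : Int) := hlast.2
        have hcn : c = ((c.toNat : ℕ) : Int) := by omega
        rw [hcn, show ((k + 1 : ℕ) : Int) = ((k : ℕ) : Int) + 1 by push_cast; ring]
        exact pv_slice_snoc peaks c.toNat k (by omega) (by omega)
      · rw [if_neg hc, hbs, if_neg hc]
        refine Prod.ext ?_ ?_
        · simp only
          rw [pv_zip_concat, List.map_append]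
          rfl
        · simp only
          rw [pv_getLastD_snoc, show ((k + 1 : ℕ) : Int) = ((k : ℕ) : Int) + 1 by push_cast; ring]
          exact (pv_slice_one peaks k (by omega)).symm

-- ===== VERDICT (by name: the statement is the Claim_ definition above) =====
theorem group_consecutive_peaks_spec : Claim_equal_group_consecutive_peaks := by
  intro peaks max_gap _
  unfold Spec_group_consecutive_peaks group_consecutive_peaks group_consecutive_peaks_alt
  by_cases hlen : peaks.length = 0
  · simp [hlen]
  · rw [if_neg hlen, if_neg hlen]
    have h1 : 1 ≤ peaks.length := Nat.one_le_iff_ne_zero.mpr hlen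
    simp only []
    rw [pv_invariant peaks max_gap peaks.length h1 (le_refl _)]
    simp only [List.tail_cons]
    rw [pv_zip_concat, List.map_append]
    rfl
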